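-- pv_equiv track=rewrite | github.com/jasmintang/assignment3 | assignment3.py | positive_male
-- ===== SOURCE A (Python) =====
-- def positive_male(y):
--     key = []
--     group_most = []
--     __he_data = dict()
--     for (i, j) in zip(y[0], y[1]):
--         __he_data[j] = i
--     for i in __he_data:
--             key.append(i)
--     for i in range(len(key)):
--         if i > 9:
--             break
--         group_most.append("he's a " + key[i] + ". They fight crime!")
--     return group_most
-- ===== SOURCE B (Python) =====
-- def positive_male(y):
--     seen = set()
--     result = []
--     for i, j in zip(y[0], y[1]):
--         if j not in seen:
--             seen.add(j)
--             result.append("he's a " + j + ". They fight crime!")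
--             if len(result) == 10:
--                 break
--     return result
-- ===== Notes on version B (the rewrite author's own statement) =====
-- stated objective: simpler
-- what changed: A's three passes (build a dict for dedup, copy its keys out, index-loop with a break to format the first 10) are fused into one short-circuiting pass over zip(y[0], y[1]) that maintains a seen-set and appends the formatted string at first occurrence, breaking as soon as 10 results exist.
import Mathlib
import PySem

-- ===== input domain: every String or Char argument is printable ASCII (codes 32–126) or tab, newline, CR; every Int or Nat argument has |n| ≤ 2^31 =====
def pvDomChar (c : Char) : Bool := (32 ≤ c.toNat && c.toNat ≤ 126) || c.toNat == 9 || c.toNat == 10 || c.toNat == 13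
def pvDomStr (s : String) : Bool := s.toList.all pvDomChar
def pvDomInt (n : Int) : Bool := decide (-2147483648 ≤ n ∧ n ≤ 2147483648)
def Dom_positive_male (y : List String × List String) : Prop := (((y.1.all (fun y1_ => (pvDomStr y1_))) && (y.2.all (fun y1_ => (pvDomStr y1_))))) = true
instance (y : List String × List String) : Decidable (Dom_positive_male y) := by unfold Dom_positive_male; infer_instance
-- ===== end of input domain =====

-- B fuses A's three passes (dict build, key copy, indexed formatting loop with break)
-- into one short-circuiting pass over the zipped lists with a seen-set (objective: simpler).

-- ===== PORT A =====
-- third loop of A: 'for i in range(len(key)): if i > 9: break; group_most.append(...)'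
def pmLoopA (key : List String) : List Int → List String → List String
  | [], acc => acc
  | i :: rest, acc =>
      if i > 9 then acc
      else pmLoopA key rest
        (acc ++ ["he's a " ++ PySem.List.pyGetD key i "" ++ ". They fight crime!"])

def positive_male (y : List String × List String) : List String :=
  let pairs := y.1.zip y.2
  let he_data : PySem.Dict String String :=
    pairs.foldl (fun d ij => d.insert ij.2 ij.1) PySem.Dict.empty
  -- 'for i in __he_data: key.append(i)'
  let key := he_data.keys.foldl (fun acc i => acc ++ [i]) []
  pmLoopA key (PySem.List.pyRange 0 key.length 1) []

-- ===== PORT B =====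
-- 'for i, j in zip(y[0], y[1]): if j not in seen: seen.add(j); result.append(...); if len(result) == 10: break'
def pmLoopB : List (String × String) → PySem.Set String → List String → List String
  | [], _, result => result
  | ij :: rest, seen, result =>
      if PySem.Set.contains seen ij.2 then pmLoopB rest seen result
      else
        let result' := result ++ ["he's a " ++ ij.2 ++ ". They fight crime!"]
        if result'.length = 10 then result'
        else pmLoopB rest (PySem.Set.add seen ij.2) result'

def positive_male_alt (y : List String × List String) : List String :=
  pmLoopB (y.1.zip y.2) PySem.Set.empty []

-- ===== PRECONDITION & SPEC =====
def Spec_positive_male (y : List String × List String) (out : List String) : Prop := out = positive_male_alt y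
instance (y : List String × List String) (out : List String) : Decidable (Spec_positive_male y out) := by unfold Spec_positive_male; infer_instance

-- ===== CLAIM (what is proved, stated in full; the proofs are below) =====
def Claim_equal_positive_male : Prop := ∀ (y : List String × List String), Dom_positive_male y → Spec_positive_male y (positive_male y)

-- ===== LEMMAS AND PROOFS =====

def pmFmt (k : String) : String := "he's a " ++ k ++ ". They fight crime!"

-- A's indexed loop with break formats the first 10 keys
theorem pmLoopA_range (key : List String) :
    ∀ (n a : Nat) (acc : List String), key.length - a = n →
      pmLoopA key (PySem.List.pyRange (a : Int) (key.length : Int) 1) acc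
        = acc ++ ((key.drop a).take (10 - a)).map pmFmt := by
  intro n
  induction n with
  | zero =>
      intro a acc h
      have hle : (key.length : Int) ≤ (a : Int) := by
        exact_mod_cast Nat.le_of_sub_eq_zero h
      rw [PySem.List.pyRange_one_eq_nil hle]
      have hnil : key.drop a = [] := List.drop_eq_nil_of_le (by omega)
      simp [pmLoopA, hnil]
  | succ n ih =>
      intro a acc h
      have hlt : (a : Int) < (key.length : Int) := by exact_mod_cast (by omega : a < key.length)
      rw [PySem.List.pyRange_one_cons hlt]
      by_cases h9 : a > 9
      · have h9' : ((a : Int) > 9) := by exact_mod_cast h9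
        have htake : 10 - a = 0 := by omega
        simp [pmLoopA, h9', htake]
      · have h9' : ¬ ((a : Int) > 9) := by exact_mod_cast h9
        have ha : a < key.length := by omega
        have hget : PySem.List.pyGetD key (a : Int) "" = key[a] := by
          rw [PySem.List.pyGetD_natCast]
          exact List.getD_eq_getElem key "" ha
        have hstep : ((a : Int) + 1) = ((a + 1 : Nat) : Int) := by push_cast; ring
        rw [pmLoopA, if_neg h9', hget, hstep, ih (a + 1) _ (by omega)]
        have hdrop : key.drop a = key[a] :: key.drop (a + 1) := List.drop_eq_getElem_cons ha
        have h10 : 10 - a = (10 - (a + 1)) + 1 := by omega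
        rw [hdrop, h10, List.take_succ_cons, List.map_cons]
        simp only [pmFmt, List.append_assoc, List.singleton_append]

-- removing an element the filter drops anyway does not change the filter
theorem filter_discard {p : String → Bool} (s : PySem.Set String) (j : String)
    (hpj : p j = false) : (PySem.Set.discard s j).filter p = s.filter p := by
  simp only [PySem.Set.discard, List.filter_filter]
  congr 1
  funext a
  by_cases ha : a = j
  · simp [ha, hpj]
  · simp [ha]

-- B's loop, characterised: it appends the formatted fresh keys, capped at 10 results
theorem pmLoopB_spec :
    ∀ (l : List (String × String)) (seen : PySem.Set String) (result : List String),
      result.length < 10 →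
      pmLoopB l seen result
        = result ++ (((PySem.Set.ofList (l.map (·.2))).filter
            (fun y => !(PySem.Set.contains seen y))).take (10 - result.length)).map pmFmt := by
  intro l
  induction l with
  | nil => intro seen result _; simp [pmLoopB, PySem.Set.ofList_nil]
  | cons ij rest ih =>
      intro seen result hlen
      rw [List.map_cons, PySem.Set.ofList_cons]
      by_cases hc : PySem.Set.contains seen ij.2 = true
      · rw [pmLoopB, if_pos hc, ih seen result hlen, List.filter_cons]
        have hfalse : (!(PySem.Set.contains seen ij.2)) = false := by rw [hc]; rfl
        rw [hfalse, if_neg (by simp), filter_discard _ _ hfalse]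
      · have hcf : PySem.Set.contains seen ij.2 = false := eq_false_of_ne_true hc
        have hcb : (!(PySem.Set.contains seen ij.2)) = true := by rw [hcf]; rfl
        rw [pmLoopB, if_neg hc, List.filter_cons, hcb, if_pos rfl]
        have h10 : 10 - result.length = (10 - (result.length + 1)) + 1 := by omega
        by_cases hfull : result.length + 1 = 10
        · have hl10 : (result ++ ["he's a " ++ ij.2 ++ ". They fight crime!"]).length = 10 := by
            simp; omega
          rw [if_pos hl10]
          have htail : 10 - (result.length + 1) = 0 := by omega
          simp [h10, htail, pmFmt]
        · have hl10 : ¬ (result ++ ["he's a " ++ ij.2 ++ ". They fight crime!"]).length = 10 := by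
            simp; omega
          rw [if_neg hl10, ih _ _ (by simp; omega)]
          have hfun : (fun y => !(PySem.Set.contains (PySem.Set.add seen ij.2) y))
              = (fun y => (!(PySem.Set.contains seen y)) && (!(y == ij.2))) := by
            funext a
            by_cases ha : a = ij.2
            · simp [PySem.Set.contains_eq_listContains, List.contains_eq_mem, ha]
            · have hmem : a ∈ PySem.Set.add seen ij.2 ↔ a ∈ seen := by
                rw [PySem.Set.mem_add]; tauto
              simp [PySem.Set.contains_eq_listContains, List.contains_eq_mem, hmem, ha]
          have hfilter : (PySem.Set.discard (PySem.Set.ofList (rest.map (·.2))) ij.2).filter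
                (fun y => !(PySem.Set.contains seen y))
              = (PySem.Set.ofList (rest.map (·.2))).filter
                (fun y => !(PySem.Set.contains (PySem.Set.add seen ij.2) y)) := by
            rw [hfun]
            simp only [PySem.Set.discard, List.filter_filter]
          rw [hfilter, h10]
          simp [pmFmt, List.take_succ_cons]

-- A's first two loops: the key list is the first-occurrence dedup of the zipped second components
theorem key_eq (pairs : List (String × String)) :
    ((pairs.foldl (fun d ij => d.insert ij.2 ij.1)
        (PySem.Dict.empty : PySem.Dict String String)).keys.foldl
          (fun acc i => acc ++ [i]) [])
      = PySem.Set.ofList (pairs.map (·.2)) := by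
  rw [PySem.List.foldl_append_singleton]
  rw [PySem.Dict.keys_foldl_insert_key pairs (·.2) (fun d ij => ij.1) PySem.Dict.empty]
  simp [PySem.Dict.keys_empty, PySem.Set.update_nil_left]

-- ===== VERDICT (by name: the statement is the Claim_ definition above) =====
theorem positive_male_spec : Claim_equal_positive_male := by
  intro y _
  unfold Spec_positive_male
  simp only [positive_male, positive_male_alt]
  rw [key_eq]
  have hA := pmLoopA_range (PySem.Set.ofList ((y.1.zip y.2).map (·.2)))
    (PySem.Set.ofList ((y.1.zip y.2).map (·.2))).length 0 [] rfl
  simp only [Nat.cast_zero] at hA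
  rw [hA, pmLoopB_spec _ _ _ (by simp)]
  simp [PySem.Set.contains_eq_listContains, PySem.Set.empty]
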